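-- pv_equiv track=rewrite | github.com/ASEVlad/Mira_Network | src/utils.py | trim_stacktrace_error
-- ===== SOURCE A (Python) =====
-- def trim_stacktrace_error(log: str) -> str:
--     """
--     Keeps only the first two stacktrace lines that start with '#'.
--     """
--     lines = log.strip().splitlines()
--     trimmed_lines = []
--     count = 0
--
--     for line in lines:
--         if line.strip().startswith("#"):
--             if count < 2:
--                 trimmed_lines.append(line)
--                 count += 1
--             else:
--                 break
--         else:
--             trimmed_lines.append(line)
--
--     return "\n".join(trimmed_lines)
-- ===== SOURCE B (Python) =====
-- def trim_stacktrace_error(log: str) -> str: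
--     """
--     Keeps only the first two stacktrace lines that start with '#'.
--     """
--     lines = log.strip().splitlines()
--     positions = [i for i, line in enumerate(lines) if line.strip().startswith("#")]
--     if len(positions) >= 3:
--         lines = lines[:positions[2]]
--     return "\n".join(lines)
-- ===== Notes on version B (the rewrite author's own statement) =====
-- stated objective: simpler
-- what changed: Replaces the per-line counter-with-break accumulation loop by an index table of the stacktrace-marker line positions plus a single slice before the third such position.
import Mathlib
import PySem

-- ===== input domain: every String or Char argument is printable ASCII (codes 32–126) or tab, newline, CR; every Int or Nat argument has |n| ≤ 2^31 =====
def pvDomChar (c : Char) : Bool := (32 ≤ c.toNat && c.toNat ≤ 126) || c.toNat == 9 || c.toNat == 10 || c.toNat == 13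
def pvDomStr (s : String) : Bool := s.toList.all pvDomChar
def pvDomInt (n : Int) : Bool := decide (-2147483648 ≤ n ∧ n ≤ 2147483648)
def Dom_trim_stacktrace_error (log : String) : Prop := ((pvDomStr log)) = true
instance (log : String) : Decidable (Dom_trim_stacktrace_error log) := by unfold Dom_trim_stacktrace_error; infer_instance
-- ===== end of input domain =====

-- B replaces A's counter-with-break accumulation loop by an index table of '#'-line
-- positions plus one slice (objective: simpler).


-- ===== PORT A =====
-- the for-loop with its counter and break, as structural recursion over the lines
def pvLoopA (lines : List String) (count : Nat) : List String :=
  match lines with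
  | [] => []
  | line :: rest =>
    if PySem.Str.startswith (PySem.Str.strip line) "#" then
      if count < 2 then line :: pvLoopA rest (count + 1)
      else []
    else line :: pvLoopA rest count

def trim_stacktrace_error (log : String) : String :=
  PySem.Str.join "\n" (pvLoopA (PySem.Str.splitlines (PySem.Str.strip log)) 0)

-- ===== PORT B =====
def trim_stacktrace_error_alt (log : String) : String :=
  let lines := PySem.Str.splitlines (PySem.Str.strip log)
  let positions := ((PySem.List.enumerate lines 0).filter
      (fun p => PySem.Str.startswith (PySem.Str.strip p.2) "#")).map (·.1)
  let lines' := if positions.length ≥ 3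
      then PySem.List.slice lines none (PySem.List.pyGet? positions 2)
      else lines
  PySem.Str.join "\n" lines'

-- ===== PRECONDITION & SPEC =====
def Spec_trim_stacktrace_error (log : String) (out : String) : Prop := out = trim_stacktrace_error_alt log
instance (log : String) (out : String) : Decidable (Spec_trim_stacktrace_error log out) := by unfold Spec_trim_stacktrace_error; infer_instance

-- ===== CLAIM (what is proved, stated in full; the proofs are below) =====
def Claim_equal_trim_stacktrace_error : Prop := ∀ (log : String), Dom_trim_stacktrace_error log → Spec_trim_stacktrace_error log (trim_stacktrace_error log)

-- ===== LEMMAS AND PROOFS =====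

-- proof-side: the index at which the loop cuts when k more '#'-lines may still be kept
def pvCut (p : String → Bool) (ls : List String) (k : Nat) : Nat :=
  match ls with
  | [] => 0
  | l :: rest =>
    if p l then (if k = 0 then 0 else pvCut p rest (k - 1) + 1)
    else pvCut p rest k + 1

def pvP (l : String) : Bool := PySem.Str.startswith (PySem.Str.strip l) "#"

theorem pvLoopA_eq_take (ls : List String) (c : Nat) (hc : c ≤ 2) :
    pvLoopA ls c = ls.take (pvCut pvP ls (2 - c)) := by
  induction ls generalizing c with
  | nil => simp [pvLoopA, pvCut]
  | cons l rest ih =>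
    show (if pvP l then _ else _) = List.take (if pvP l then _ else _) _
    by_cases hp : pvP l
    · by_cases hlt : c < 2
      · have h2 : 2 - c ≠ 0 := by omega
        rw [if_pos hp, if_pos hp, if_pos (by omega : c < 2), if_neg h2]
        rw [List.take_succ_cons]
        rw [ih (c + 1) (by omega), (by omega : 2 - (c + 1) = 2 - c - 1)]
      · have hc2 : c = 2 := by omega
        subst hc2
        rw [if_pos hp, if_pos hp, if_neg (by omega : ¬ (2 < 2)),
            if_pos rfl, List.take_zero]
    · rw [if_neg hp, if_neg hp, List.take_succ_cons, ih c hc]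

theorem pvCut_of_few (p : String → Bool) (ls : List String) (k : Nat)
    (h : (ls.filter p).length ≤ k) : pvCut p ls k = ls.length := by
  induction ls generalizing k with
  | nil => simp [pvCut]
  | cons l rest ih =>
    by_cases hp : p l
    · simp only [List.filter_cons, hp, if_pos, List.length_cons] at h
      have hk : k ≠ 0 := by omega
      simp only [pvCut, hp, if_pos, if_neg hk, List.length_cons]
      rw [ih (k - 1) (by omega)]
    · simp only [List.filter_cons, hp] at h
      simp only [pvCut, hp, Bool.false_eq_true, if_false, List.length_cons]
      rw [ih k (by simpa using h)]

def pvPos (ls : List String) (s : Int) : List Int :=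
  ((PySem.List.enumerate ls s).filter (fun q => pvP q.2)).map (·.1)

theorem pvPos_cons (l : String) (rest : List String) (s : Int) :
    pvPos (l :: rest) s =
      if pvP l then s :: pvPos rest (s + 1) else pvPos rest (s + 1) := by
  by_cases hp : pvP l
  · simp [pvPos, PySem.List.enumerate_cons, hp]
  · simp [pvPos, PySem.List.enumerate_cons, hp]

theorem pvPos_length (ls : List String) (s : Int) :
    (pvPos ls s).length = (ls.filter pvP).length := by
  induction ls generalizing s with
  | nil => simp [pvPos, PySem.List.enumerate_nil]
  | cons l rest ih =>
    rw [pvPos_cons]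
    by_cases hp : pvP l
    · simp [hp, ih (s + 1)]
    · simp [hp, ih (s + 1)]

theorem pvPos_getElem? (ls : List String) (s : Int) (k : Nat) :
    (pvPos ls s)[k]? =
      if k + 1 ≤ (ls.filter pvP).length then some (s + (pvCut pvP ls k : Int)) else none := by
  induction ls generalizing s k with
  | nil => simp [pvPos, PySem.List.enumerate_nil]
  | cons l rest ih =>
    rw [pvPos_cons]
    by_cases hp : pvP l
    · rw [if_pos hp]
      cases k with
      | zero =>
        simp only [List.getElem?_cons_zero, List.filter_cons, hp, if_pos,
          List.length_cons, pvCut]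
        simp
      | succ k =>
        rw [List.getElem?_cons_succ, ih (s + 1) k]
        simp only [List.filter_cons, hp, if_pos, List.length_cons, pvCut]
        rw [if_neg (by omega : ¬ (k + 1 = 0))]
        split_ifs with h1 h2 h2
        · congr 1; push_cast; ring
        · omega
        · omega
        · rfl
    · rw [if_neg hp, ih (s + 1) k]
      simp only [List.filter_cons, hp, Bool.false_eq_true, if_false, pvCut]
      split_ifs with h1
      · congr 1; push_cast; ring
      · rfl

-- ===== VERDICT (by name: the statement is the Claim_ definition above) =====
theorem trim_stacktrace_error_spec : Claim_equal_trim_stacktrace_error := by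
  intro log _
  show _ = _
  simp only [trim_stacktrace_error, trim_stacktrace_error_alt]
  generalize PySem.Str.splitlines (PySem.Str.strip log) = ls
  refine congrArg (PySem.Str.join "\n") ?_
  have hpos : ((PySem.List.enumerate ls 0).filter
      (fun q => PySem.Str.startswith (PySem.Str.strip q.2) "#")).map (·.1) = pvPos ls 0 := by
    simp only [pvPos, pvP]
  rw [hpos]
  rw [pvLoopA_eq_take ls 0 (by omega)]
  by_cases h3 : (pvPos ls 0).length ≥ 3
  · have hlen := pvPos_length ls 0
    have hget := pvPos_getElem? ls 0 2
    rw [if_pos (by omega)] at hget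
    have h2 : PySem.List.pyGet? (pvPos ls 0) (2 : Int) = (pvPos ls 0)[2]? := by
      exact_mod_cast PySem.List.pyGet?_natCast (pvPos ls 0) 2
    rw [if_pos h3, h2, hget]
    rw [zero_add]
    rw [PySem.List.slice_to_natCast]
  · have hlen := pvPos_length ls 0
    rw [pvCut_of_few pvP ls 2 (by omega), if_neg h3, List.take_length]
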